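-- pv_equiv track=rewrite | github.com/sefimochkin/keychain | keychain_base/development/comment_tests_dependencies/shared_code.py | find_tests_block
-- ===== SOURCE A (Python) =====
-- def find_tests_block(lines):
--     starting_index = -1
--     for (i, line) in enumerate(lines):
--         if "#[cfg(test)]" in line:
--             starting_index = i
--
--     finishing_index = -1
--     parenthesis_count = 0
--     for (i, line) in enumerate(lines[starting_index + 1: len(lines)]):
--         if '{' in line:
--             parenthesis_count += line.count('{')
--         if '}' in line:
--             parenthesis_count -= line.count('}')
--
--         if parenthesis_count == 0:
--             finishing_index = starting_index + 2 + i
--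
--     return (starting_index, finishing_index)
-- ===== SOURCE B (Python) =====
-- def find_tests_block(lines):
--     # Single fused pass: seeing the marker resets the brace state, so the loop
--     # effectively tracks braces only after the LAST marker, with no slicing.
--     starting_index = -1
--     finishing_index = -1
--     count = 0
--     for j, line in enumerate(lines):
--         if "#[cfg(test)]" in line:
--             starting_index = j
--             count = 0
--             finishing_index = -1
--         else:
--             count += line.count('{') - line.count('}')
--             if count == 0:
--                 finishing_index = j + 1
--     return (starting_index, finishing_index)
-- ===== Notes on version B (the rewrite author's own statement) =====
-- stated objective: alternative
-- what changed: A's two staged passes (find the last marker, then slice and rescan the tail counting braces) are fused into one single pass whose brace state is reset whenever the marker appears, eliminating the slice and the second enumerate loop entirely.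
import Mathlib
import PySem

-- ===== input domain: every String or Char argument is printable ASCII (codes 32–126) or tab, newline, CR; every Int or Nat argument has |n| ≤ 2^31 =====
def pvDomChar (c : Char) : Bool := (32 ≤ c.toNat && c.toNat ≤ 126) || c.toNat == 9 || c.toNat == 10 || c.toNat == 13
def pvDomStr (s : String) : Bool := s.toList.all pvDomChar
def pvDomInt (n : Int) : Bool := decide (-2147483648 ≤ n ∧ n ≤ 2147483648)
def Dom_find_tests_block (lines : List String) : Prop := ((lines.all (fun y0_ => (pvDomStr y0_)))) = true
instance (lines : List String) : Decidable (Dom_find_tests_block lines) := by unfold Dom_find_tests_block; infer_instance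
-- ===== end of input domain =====

-- B fuses A's two staged passes (find the last marker, then slice and rescan the tail)
-- into ONE pass that resets its brace state whenever the marker appears (objective: alternative).

-- ===== PORT A =====
def find_tests_block (lines : List String) : Int × Int :=
  let s : Int := (PySem.List.enumerate lines).foldl
      (fun (acc : Int) p => if PySem.Str.isIn "#[cfg(test)]" p.2 then p.1 else acc) (-1)
  let r := (PySem.List.enumerate (PySem.List.slice lines (some (s + 1)) (some (lines.length : Int)))).foldl
      (fun (acc : Int × Int) p =>
        let c1 := if PySem.Str.isIn "{" p.2 then acc.1 + (PySem.Str.count p.2 "{" : Int) else acc.1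
        let c2 := if PySem.Str.isIn "}" p.2 then c1 - (PySem.Str.count p.2 "}" : Int) else c1
        (c2, if c2 = 0 then s + 2 + p.1 else acc.2)) ((0 : Int), (-1 : Int))
  (s, r.2)

-- ===== PORT B =====
def find_tests_block_alt (lines : List String) : Int × Int :=
  let r := (PySem.List.enumerate lines).foldl
      (fun (st : Int × Int × Int) p =>
        if PySem.Str.isIn "#[cfg(test)]" p.2 then (p.1, 0, -1)
        else
          let c := st.2.1 + ((PySem.Str.count p.2 "{" : Int) - (PySem.Str.count p.2 "}" : Int))
          (st.1, c, if c = 0 then p.1 + 1 else st.2.2))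
      ((-1 : Int), (0 : Int), (-1 : Int))
  (r.1, r.2.2)

-- ===== PRECONDITION & SPEC =====
def Spec_find_tests_block (lines : List String) (out : Int × Int) : Prop := out = find_tests_block_alt lines
instance (lines : List String) (out : Int × Int) : Decidable (Spec_find_tests_block lines out) := by unfold Spec_find_tests_block; infer_instance

-- ===== CLAIM (what is proved, stated in full; the proofs are below) =====
def Claim_equal_find_tests_block : Prop := ∀ (lines : List String), Dom_find_tests_block lines → Spec_find_tests_block lines (find_tests_block lines)

-- ===== LEMMAS AND PROOFS =====

-- line.count('{') - line.count('}') for one line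
def pvDel (l : String) : Int := (PySem.Str.count l "{" : Int) - (PySem.Str.count l "}" : Int)

-- common abstraction of both brace-scanning loops: running count and last zero position,
-- recording value b at the first processed line, b+1 at the next, …
def pvWalk (b c f : Int) : List String → Int × Int
  | [] => (c, f)
  | l :: t => pvWalk (b + 1) (c + pvDel l) (if c + pvDel l = 0 then b else f) t

-- no occurrence of a (nonempty) pattern means count.go never bumps the accumulator
theorem pv_count_go_zero (sub : List Char) :
    ∀ (fuel : Nat) (s : List Char) (acc : Nat), ¬ sub <:+: s →
      PySem.Chars.count.go sub fuel s acc = acc := by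
  intro fuel
  induction fuel with
  | zero => intro s acc _; cases s <;> simp [PySem.Chars.count.go]
  | succ n ih =>
    intro s acc h
    cases s with
    | nil => simp [PySem.Chars.count.go]
    | cons a t =>
      have hpre : ¬ sub.isPrefixOf (a :: t) = true := by
        rw [List.isPrefixOf_iff_prefix]
        exact fun hp => h hp.isInfix
      rw [show PySem.Chars.count.go sub (n + 1) (a :: t) acc
            = if sub.isPrefixOf (a :: t) then
                PySem.Chars.count.go sub n (List.drop sub.length (a :: t)) (acc + 1)
              else PySem.Chars.count.go sub n t acc from rfl, if_neg hpre]
      refine ih t acc (fun hc => ?_)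
      obtain ⟨u, v, huv⟩ := hc
      exact h ⟨a :: u, v, by simp [← huv]⟩

-- the pattern does not occur in s at all: count is 0
theorem pv_chars_count_zero (s sub : List Char) (hne : sub ≠ [])
    (h : ¬ sub <:+: s) : PySem.Chars.count s sub = 0 := by
  rw [show PySem.Chars.count s sub
        = if sub.isEmpty then s.length + 1 else PySem.Chars.count.go sub s.length s 0 from rfl,
     if_neg (by simp [List.isEmpty_iff, hne])]
  exact pv_count_go_zero sub s.length s 0 h

-- the two guarded count updates of A amount to adding pvDel
theorem pv_guard_eq (c : Int) (l : String) :
    (let c1 := if PySem.Str.isIn "{" l then c + (PySem.Str.count l "{" : Int) else c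
     if PySem.Str.isIn "}" l then c1 - (PySem.Str.count l "}" : Int) else c1) = c + pvDel l := by
  have hA : PySem.Str.isIn "{" l = false → PySem.Chars.count l.toList ['{'] = 0 := by
    intro ho
    rw [PySem.Str.isIn_eq] at ho
    exact pv_chars_count_zero l.toList ['{'] (by decide) ((PySem.Chars.isIn_eq_false_iff _ _).1 ho)
  have hB : PySem.Str.isIn "}" l = false → PySem.Chars.count l.toList ['}'] = 0 := by
    intro hc
    rw [PySem.Str.isIn_eq] at hc
    exact pv_chars_count_zero l.toList ['}'] (by decide) ((PySem.Chars.isIn_eq_false_iff _ _).1 hc)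
  cases ho : PySem.Str.isIn "{" l <;> cases hc : PySem.Str.isIn "}" l
  · simp [pvDel, hA ho, hB hc]
  · simp [pvDel, hA ho]
    omega
  · simp [pvDel, hB hc]
  · simp [pvDel]
    omega

-- a loop that overwrites its accumulator on every match returns the LAST match: reverse find?
theorem pv_foldl_overwrite {α β : Type} (q : α → Bool) (f : α → β) (xs : List α) :
    ∀ (d : β),
      xs.foldl (fun acc x => if q x then f x else acc) d
        = match xs.reverse.find? q with
          | some x => f x
          | none => d := by
  induction xs with
  | nil => intro d; simp
  | cons x t ih =>
    intro d
    rw [List.foldl_cons, ih, List.reverse_cons, List.find?_append]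
    cases hfind : t.reverse.find? q with
    | some p => simp
    | none => cases hq : q x <;> simp [hq]

-- A's second loop is pvWalk starting at record value s + 2 + k
theorem pv_phaseA (s : Int) (xs : List String) :
    ∀ (k c f : Int),
      (PySem.List.enumerate xs k).foldl
        (fun (acc : Int × Int) p =>
          let c1 := if PySem.Str.isIn "{" p.2 then acc.1 + (PySem.Str.count p.2 "{" : Int) else acc.1
          let c2 := if PySem.Str.isIn "}" p.2 then c1 - (PySem.Str.count p.2 "}" : Int) else c1
          (c2, if c2 = 0 then s + 2 + p.1 else acc.2)) (c, f)
      = pvWalk (s + 2 + k) c f xs := by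
  induction xs with
  | nil => intro k c f; simp [pvWalk, PySem.List.enumerate_nil]
  | cons l t ih =>
    intro k c f
    rw [PySem.List.enumerate_cons, List.foldl_cons]
    simp only []
    rw [pv_guard_eq c l, ih]
    simp only [pvWalk]
    rw [show s + 2 + (k + 1) = s + 2 + k + 1 by ring]

-- B's loop over marker-free lines keeps its first component and runs pvWalk on the rest
theorem pv_phaseB (xs : List String) (hnm : ∀ l ∈ xs, PySem.Str.isIn "#[cfg(test)]" l = false) :
    ∀ (k s c f : Int),
      (PySem.List.enumerate xs k).foldl
        (fun (st : Int × Int × Int) p =>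
          if PySem.Str.isIn "#[cfg(test)]" p.2 then (p.1, 0, -1)
          else
            let c := st.2.1 + ((PySem.Str.count p.2 "{" : Int) - (PySem.Str.count p.2 "}" : Int))
            (st.1, c, if c = 0 then p.1 + 1 else st.2.2)) (s, c, f)
      = (s, pvWalk (k + 1) c f xs) := by
  induction xs with
  | nil => intro k s c f; simp [pvWalk, PySem.List.enumerate_nil]
  | cons l t ih =>
    intro k s c f
    rw [PySem.List.enumerate_cons, List.foldl_cons]
    simp only [hnm l (by simp), Bool.false_eq_true, if_false]
    rw [ih (fun x hx => hnm x (by simp [hx]))]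
    simp only [pvWalk, pvDel]
    rfl

-- a slice up to exactly len(xs) is the same as an open-ended slice, i.e. a drop
theorem pv_slice_to_len {α : Type} (xs : List α) (a : Int) (ha : 0 ≤ a) :
    PySem.List.slice xs (some a) (some (xs.length : Int)) = xs.drop a.toNat := by
  rw [PySem.List.slice_toNat xs ha (by omega)]
  exact List.take_of_length_le (by simp)

-- ===== VERDICT (by name: the statement is the Claim_ definition above) =====
theorem find_tests_block_spec : Claim_equal_find_tests_block := by
  intro lines _
  unfold Spec_find_tests_block find_tests_block find_tests_block_alt
  rw [pv_foldl_overwrite]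
  cases hfind : (PySem.List.enumerate lines).reverse.find?
      (fun p => PySem.Str.isIn "#[cfg(test)]" p.2) with
  | none =>
    -- no marker anywhere: both sides scan the whole list
    have hnm : ∀ l ∈ lines, PySem.Str.isIn "#[cfg(test)]" l = false := by
      intro l hl
      have : ∃ p ∈ PySem.List.enumerate lines, p.2 = l := by
        have := PySem.List.map_snd_enumerate lines (0 : Int)
        rcases List.mem_map.1 (this ▸ hl) with ⟨p, hp, hpe⟩
        exact ⟨p, hp, hpe⟩
      rcases this with ⟨p, hp, hpe⟩
      have := List.find?_eq_none.1 hfind p (List.mem_reverse.2 hp)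
      simpa [hpe] using Bool.of_not_eq_true this
    dsimp only
    rw [pv_slice_to_len lines ((-1 : Int) + 1) (by omega), pv_phaseA, pv_phaseB lines hnm]
    simp
  | some p =>
    obtain ⟨hp, as, bs, hsplit, hfail⟩ := List.find?_eq_some_iff_append.1 hfind
    have hp' : PySem.Str.isIn "#[cfg(test)]" p.2 = true := by simpa using hp
    have h2 : PySem.List.enumerate lines = (bs.reverse ++ [p]) ++ as.reverse := by
      calc PySem.List.enumerate lines = ((PySem.List.enumerate lines).reverse).reverse := by simp
        _ = (as ++ p :: bs).reverse := by rw [hsplit]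
        _ = (bs.reverse ++ [p]) ++ as.reverse := by simp
    have hlen : lines.length = bs.reverse.length + 1 + as.reverse.length := by
      have h := congrArg List.length h2
      rw [PySem.List.length_enumerate] at h
      simp at h
      simp only [List.length_reverse]
      omega
    have hnlt : bs.reverse.length + 1 ≤ lines.length := by omega
    have htl : (lines.take (bs.reverse.length + 1)).length = bs.reverse.length + 1 := by
      rw [List.length_take]; omega
    have hXY : PySem.List.enumerate (lines.take (bs.reverse.length + 1)) 0
          ++ PySem.List.enumerate (lines.drop (bs.reverse.length + 1))
              ((0 : Int) + (lines.take (bs.reverse.length + 1)).length)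
        = (bs.reverse ++ [p]) ++ as.reverse := by
      rw [← PySem.List.enumerate_append, List.take_append_drop]
      exact h2
    have hX := List.append_inj hXY (by rw [PySem.List.length_enumerate, htl]; simp)
    -- p is the entry at position bs.reverse.length, so p = (↑bs.reverse.length, lines[...])
    have hpn : p = ((bs.reverse.length : Int),
        lines[bs.reverse.length]'(by omega)) := by
      have h4 : (PySem.List.enumerate lines)[bs.reverse.length]'(by
            rw [PySem.List.length_enumerate]; omega) = p := by
        simp only [h2]
        rw [List.getElem_append_left (by simp)]
        exact List.getElem_concat_length (h := rfl) _
      rw [← h4]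
      rw [PySem.List.getElem_enumerate]
      simp
    have hp1 : p.1 = (bs.reverse.length : Int) := by rw [hpn]
    -- B's fold: prefix ends in (p.1, 0, -1); tail is a marker-free pvWalk
    have hnm : ∀ l ∈ lines.drop (bs.reverse.length + 1),
        PySem.Str.isIn "#[cfg(test)]" l = false := by
      intro l hl
      have hmap : (PySem.List.enumerate (lines.drop (bs.reverse.length + 1))
            ((0 : Int) + (lines.take (bs.reverse.length + 1)).length)).map (·.2)
          = lines.drop (bs.reverse.length + 1) := PySem.List.map_snd_enumerate ..
      rcases List.mem_map.1 (hmap ▸ hl) with ⟨q, hq, hqe⟩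
      have hq' : q ∈ as := by
        have := hX.2 ▸ hq
        simpa using this
      simpa [hqe] using hfail q hq'
    dsimp only
    conv_rhs => rw [h2]
    rw [List.foldl_append, List.foldl_append]
    simp only [List.foldl_cons, List.foldl_nil, hp', if_true]
    have hYfold := hX.2 ▸ pv_phaseB (lines.drop (bs.reverse.length + 1)) hnm
        ((0 : Int) + (lines.take (bs.reverse.length + 1)).length) p.1 0 (-1)
    rw [hYfold]
    -- A's side: the slice is the same drop, and both walks start at the same offset
    rw [pv_slice_to_len lines (p.1 + 1) (by rw [hp1]; omega), pv_phaseA]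
    have hidx : (p.1 + 1).toNat = bs.reverse.length + 1 := by rw [hp1]; omega
    rw [hidx]
    have hoff : p.1 + 2 + 0 = (0 : Int) + (lines.take (bs.reverse.length + 1)).length + 1 := by
      rw [hp1, htl]; push_cast; ring
    rw [hoff]
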